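-- pv_equiv track=rewrite | github.com/jaimealonso/IWEB_SearchEngine | reference/search.py | index_conversion
-- ===== SOURCE A (Python) =====
-- from collections import defaultdict
--
-- def index_conversion(index):
--     d = defaultdict(list)
--
--     for word, priority in index:
--         d[word].append(priority)
--     terms = dict((k, v) for (k, v) in d.items())
--
--     simple_index = {}
--     for word in terms:
--         simple_index[word] = {}
--         for priority in terms[word]:
--             for document in index[(word, priority)]:
--                 if document in simple_index[word]:
--                     simple_index[word][document][0] += index[(word, priority)][document][0]
--                 else:
--                     simple_index[word][document] = [index[(word, priority)][document][0],
--                                                     index[(word, priority)][document][1]]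
--
--     return simple_index
-- ===== SOURCE B (Python) =====
-- def index_conversion(index):
--     # Declarative aggregation: each output cell is computed directly as
--     # [sum of val[0] over all priorities, val[1] from the first-seen occurrence],
--     # instead of A's incremental dict mutation with += updates.
--     words = list(dict.fromkeys(w for (w, _p) in index))
--     result = {}
--     for w in words:
--         buckets = [docs for (w2, _p), docs in index.items() if w2 == w]
--         order = list(dict.fromkeys(d for b in buckets for d in b))
--         result[w] = {d: [sum(b[d][0] for b in buckets if d in b),
--                          next(b[d] for b in buckets if d in b)[1]]
--                      for d in order}
--     return result
-- ===== Notes on version B (the rewrite author's own statement) =====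
-- stated objective: alternative
-- what changed: B replaces A's incremental dict mutation (grouping table + in-place += merging) with a declarative per-cell computation: for each word/document it directly computes [sum of val[0] over that word's priority buckets, val[1] from the first bucket containing the document].
import Mathlib
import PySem

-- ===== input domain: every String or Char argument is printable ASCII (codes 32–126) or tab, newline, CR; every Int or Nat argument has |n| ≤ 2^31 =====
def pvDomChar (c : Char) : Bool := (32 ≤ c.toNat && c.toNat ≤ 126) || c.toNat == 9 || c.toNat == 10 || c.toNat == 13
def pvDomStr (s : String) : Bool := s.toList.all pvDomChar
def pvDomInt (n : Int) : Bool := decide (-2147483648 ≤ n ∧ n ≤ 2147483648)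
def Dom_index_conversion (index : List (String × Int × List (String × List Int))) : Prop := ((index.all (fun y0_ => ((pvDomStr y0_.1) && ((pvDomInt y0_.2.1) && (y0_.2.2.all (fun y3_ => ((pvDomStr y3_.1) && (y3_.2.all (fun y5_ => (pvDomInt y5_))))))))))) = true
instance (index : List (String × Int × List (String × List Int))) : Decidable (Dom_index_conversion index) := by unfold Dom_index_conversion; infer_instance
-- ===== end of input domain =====

-- B computes each word/document cell declaratively — [sum of val[0] over the word's buckets,
-- val[1] from the first bucket containing the document] — instead of A's incremental dict mutation.

-- ===== PORT A =====
-- v[i] on a list of ints; Pre_ guarantees every list read has the needed length, so the .getD 0 default is never used inside Pre_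
def pvIdx (v : List Int) (i : Int) : Int := (PySem.List.pyGet? v i).getD 0
-- l[0] += x  (Python raises IndexError on []; unreachable here: l was stored as a two-element list)
def pvSet0 (l : List Int) (x : Int) : List Int :=
  match l with
  | [] => []
  | h :: t => (h + x) :: t
-- index[(word, priority)]: first-match lookup in the association list (the key is always present: it came from d)
def pvLookupWP (index : List (String × Int × List (String × List Int))) (w : String) (p : Int) : List (String × List Int) :=
  ((index.find? (fun e => e.1 == w && e.2.1 == p)).map (fun e => e.2.2)).getD []
-- docs[document]: first-match lookup (the key is always present in every use below)
def pvLookupDoc (docs : List (String × List Int)) (doc : String) : List Int :=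
  ((docs.find? (fun dv => dv.1 == doc)).map Prod.snd).getD []

def index_conversion (index : List (String × Int × List (String × List Int))) : List (String × List (String × List Int)) :=
  -- d = defaultdict(list); for word, priority in index: d[word].append(priority)
  let d : PySem.Dict String (List Int) :=
    index.foldl (fun d e => d.modify e.1 [] (fun l => l ++ [e.2.1])) PySem.Dict.empty
  -- terms = dict of d.items pairs, rebuilt pair by pair
  let terms : PySem.Dict String (List Int) := PySem.Dict.ofList d.items
  -- simple_index starts empty; for word in terms: … (iterating a dict iterates its keys, looking the values up)
  let si : PySem.Dict String (PySem.Dict String (List Int)) :=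
    terms.items.foldl (fun si wps =>
      -- simple_index[word] starts as a fresh empty dict
      -- for priority in terms[word]: for document in index[(word, priority)]: …
      (wps.2.foldl (fun si p =>
        let docs := pvLookupWP index wps.1 p
        ((docs.map Prod.fst).foldl (fun si document =>
          if (si.getD wps.1 PySem.Dict.empty).contains document then
            -- simple_index[word][document][0] += index[(word, priority)][document][0]
            si.modify wps.1 PySem.Dict.empty
              (fun b => b.modify document [] (fun l => pvSet0 l (pvIdx (pvLookupDoc docs document) 0)))
          else
            -- simple_index[word][document] = [ …[0], …[1] ]
            si.modify wps.1 PySem.Dict.empty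
              (fun b => b.insert document [pvIdx (pvLookupDoc docs document) 0,
                                           pvIdx (pvLookupDoc docs document) 1])) si))
        (si.insert wps.1 PySem.Dict.empty))) PySem.Dict.empty
  si.items.map (fun p => (p.1, p.2.items))

-- ===== PORT B =====
def index_conversion_alt (index : List (String × Int × List (String × List Int))) : List (String × List (String × List Int)) :=
  -- words = list(dict.fromkeys(w for (w, _p) in index))
  let words := PySem.Set.ofList (index.map (fun e => e.1))
  -- result[w] for each w, in words order (w's are distinct, so the dict's items are this map)
  words.map (fun w =>
    -- buckets = [docs for (w2, _p), docs in index.items() if w2 == w]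
    let buckets := (index.filter (fun e => e.1 == w)).map (fun e => e.2.2)
    -- order = list(dict.fromkeys(d for b in buckets for d in b))
    (w, (PySem.Set.ofList (buckets.flatMap (fun b => b.map Prod.fst))).map (fun d =>
      -- {d: [sum(b[d][0] for b in buckets if d in b), next(b[d] for b in buckets if d in b)[1]] …}
      (d, [((buckets.filter (fun b => (b.map Prod.fst).contains d)).map
              (fun b => pvIdx (pvLookupDoc b d) 0)).sum,
           pvIdx (pvLookupDoc ((buckets.find? (fun b => (b.map Prod.fst).contains d)).getD []) d) 1]))))

-- ===== PRECONDITION & SPEC =====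
-- Pre_ requires (1) distinct (word, priority) keys and per-entry distinct document keys — the input stands for a
-- Python dict of dicts, which cannot carry duplicate keys — and (2) each value list long enough for A's reads:
-- A reads val[1] (and val[0]) at a (word, document) pair's first occurrence and val[0] at every later one,
-- raising IndexError otherwise.
def Pre_index_conversion (index : List (String × Int × List (String × List Int))) : Prop :=
  (index.map (fun e => (e.1, e.2.1))).Nodup ∧
  (∀ e ∈ index, (e.2.2.map Prod.fst).Nodup) ∧
  ∀ i, (hi : i < index.length) → ∀ dv ∈ index[i].2.2,
    if ((index.take i).any
        (fun e' => e'.1 == index[i].1 && (e'.2.2.map Prod.fst).contains dv.1)) = true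
    then 1 ≤ dv.2.length else 2 ≤ dv.2.length
instance (index : List (String × Int × List (String × List Int))) : Decidable (Pre_index_conversion index) := by
  unfold Pre_index_conversion; infer_instance

def pvWitness_index_conversion : (List (String × Int × List (String × List Int))) :=
  [("a", (1, [("d", [2, 3])])), ("b", (2, [("d", [5, 7]), ("e", [1, 1])]))]

def Spec_index_conversion (index : List (String × Int × List (String × List Int))) (out : List (String × List (String × List Int))) : Prop := out = index_conversion_alt index
instance (index : List (String × Int × List (String × List Int))) (out : List (String × List (String × List Int))) : Decidable (Spec_index_conversion index out) := by unfold Spec_index_conversion; infer_instance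

-- ===== CLAIM (what is proved, stated in full; the proofs are below) =====
def Claim_equal_index_conversion : Prop := ∀ (index : List (String × Int × List (String × List Int))), Dom_index_conversion index → Pre_index_conversion index → Spec_index_conversion index (index_conversion index)

-- ===== LEMMAS AND PROOFS =====

-- the canonical value both ports are proved equal to: the words in first-appearance order, each with
-- the bucket obtained by folding pvBucketStep over all its docs items in index order
def pvBucketStep (b : PySem.Dict String (List Int)) (dv : String × List Int) : PySem.Dict String (List Int) :=
  if b.contains dv.1 then b.modify dv.1 [] (fun l => pvSet0 l (pvIdx dv.2 0))
  else b.insert dv.1 [pvIdx dv.2 0, pvIdx dv.2 1]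

def pvBucketOf (index : List (String × Int × List (String × List Int))) (w : String) : PySem.Dict String (List Int) :=
  (index.filter (fun e => e.1 == w)).foldl (fun b e => e.2.2.foldl pvBucketStep b) PySem.Dict.empty

def pvCanon (index : List (String × Int × List (String × List Int))) : List (String × PySem.Dict String (List Int)) :=
  (PySem.Set.ofList (index.map (fun e => e.1))).map (fun w => (w, pvBucketOf index w))

-- the sum / first-seen-value characterisation of a bucket fold
def pvSum (L : List (String × List Int)) (d : String) : Int :=
  ((L.filter (fun dv => dv.1 == d)).map (fun dv => pvIdx dv.2 0)).sum
def pvFst (L : List (String × List Int)) (d : String) : Int :=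
  pvIdx (((L.find? (fun dv => dv.1 == d)).map Prod.snd).getD []) 1

theorem pvFind_assoc {β : Type} (l : List (String × β)) (dv : String × β) (h : dv ∈ l)
    (hnd : (l.map Prod.fst).Nodup) : l.find? (fun x => x.1 == dv.1) = some dv := by
  induction l with
  | nil => cases h
  | cons a t ih =>
    rcases List.mem_cons.1 h with rfl | ht
    · simp [List.find?]
    · have hne : a.1 ≠ dv.1 := by
        intro hh
        exact (List.nodup_cons.1 hnd).1 (hh ▸ List.mem_map_of_mem ht)
      rw [List.find?_cons_of_neg (p := _) (h := by simp [hne])]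
      exact ih ht (List.nodup_cons.1 hnd).2

theorem pvFindWP (index : List (String × Int × List (String × List Int)))
    (e : String × Int × List (String × List Int)) (he : e ∈ index)
    (hnd : (index.map (fun e => (e.1, e.2.1))).Nodup) :
    index.find? (fun x => x.1 == e.1 && x.2.1 == e.2.1) = some e := by
  induction index with
  | nil => cases he
  | cons a t ih =>
    rcases List.mem_cons.1 he with rfl | ht
    · simp [List.find?]
    · have hne : ¬(a.1 = e.1 ∧ a.2.1 = e.2.1) := by
        rintro ⟨h1, h2⟩
        exact (List.nodup_cons.1 hnd).1 (by
          have hm : (e.1, e.2.1) ∈ t.map (fun e => (e.1, e.2.1)) := List.mem_map_of_mem ht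
          show ((a.1, a.2.1) : String × Int) ∈ _
          rw [h1, h2]; exact hm)
      rw [List.find?_cons_of_neg (p := _) (h := by
        simp only [Bool.and_eq_true, beq_iff_eq]
        exact fun h => hne ⟨h.1, h.2⟩)]
      exact ih ht (List.nodup_cons.1 hnd).2

theorem pvLookupWP_eq (index : List (String × Int × List (String × List Int)))
    (e : String × Int × List (String × List Int)) (he : e ∈ index)
    (hnd : (index.map (fun e => (e.1, e.2.1))).Nodup) :
    pvLookupWP index e.1 e.2.1 = e.2.2 := by
  unfold pvLookupWP
  rw [pvFindWP index e he hnd]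
  rfl

theorem pvLookupDoc_eq (docs : List (String × List Int)) (dv : String × List Int) (h : dv ∈ docs)
    (hnd : (docs.map Prod.fst).Nodup) : pvLookupDoc docs dv.1 = dv.2 := by
  unfold pvLookupDoc
  rw [pvFind_assoc docs dv h hnd]
  rfl

theorem pvD_items (index : List (String × Int × List (String × List Int))) :
    (index.foldl (fun d e => d.modify e.1 [] (fun l => l ++ [e.2.1]))
        (PySem.Dict.empty : PySem.Dict String (List Int))).items
      = (PySem.Set.ofList (index.map (fun e => e.1))).map
          (fun w => (w, (index.filter (fun e => e.1 == w)).map (fun e => e.2.1))) := by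
  have hkeys : (index.foldl (fun d e => d.modify e.1 [] (fun l => l ++ [e.2.1]))
      (PySem.Dict.empty : PySem.Dict String (List Int))).keys
      = PySem.Set.ofList (index.map (fun e => e.1)) := by
    rw [PySem.Dict.keys_foldl_modify_key index (fun e => e.1) [] (fun _ e => fun l => l ++ [e.2.1])]
    rw [PySem.Dict.keys_empty, PySem.Set.ofList_eq_foldl]
    rfl
  have hnd : (index.foldl (fun d e => d.modify e.1 [] (fun l => l ++ [e.2.1]))
      (PySem.Dict.empty : PySem.Dict String (List Int))).keys.Nodup := by
    rw [hkeys]; exact PySem.Set.nodup_ofList _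
  rw [PySem.Dict.items_eq_map_keys _ hnd [], hkeys]
  refine List.map_congr_left fun w hw => ?_
  have hfold : (index.foldl (fun d e => d.modify e.1 [] (fun l => l ++ [e.2.1]))
      (PySem.Dict.empty : PySem.Dict String (List Int)))
      = ((index.map (fun e => (e.1, e.2.1))).foldl
          (fun d p => d.modify p.1 [] (fun l => l ++ [p.2]))
          (PySem.Dict.empty : PySem.Dict String (List Int))) :=
    (List.foldl_map
      (f := fun (e : String × Int × List (String × List Int)) => ((e.1, e.2.1) : String × Int))
      (g := fun (d : PySem.Dict String (List Int)) (p : String × Int) =>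
        d.modify p.1 [] (fun l => l ++ [p.2]))).symm
  rw [hfold, PySem.Dict.getD_foldl_modify_append, PySem.Dict.getD_empty, List.nil_append,
    List.filter_map, List.map_map]
  rfl

theorem pvOfList_items {ν : Type} (L : List (String × ν)) (h : (L.map Prod.fst).Nodup) :
    (PySem.Dict.ofList L).items = L := by
  have : (PySem.Dict.ofList L) = L.foldl (fun d kv => d.insert kv.1 kv.2) PySem.Dict.empty := rfl
  rw [this, PySem.Dict.items_foldl_insert_fresh L (fun kv => kv.1) (fun kv => kv.2)
    PySem.Dict.empty (fun a _ => PySem.Dict.contains_empty _) h]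
  have he : (PySem.Dict.empty : PySem.Dict String ν).items = [] := rfl
  rw [he, List.nil_append]
  simp

theorem pvInsertFold {α : Type} (w : String) (l : List α)
    (body : PySem.Dict String (PySem.Dict String (List Int)) → α → PySem.Dict String (PySem.Dict String (List Int)))
    (h : PySem.Dict String (List Int) → α → PySem.Dict String (List Int))
    (compat : ∀ (si : PySem.Dict String (PySem.Dict String (List Int))) (b : PySem.Dict String (List Int)) (x : α),
      x ∈ l → body (si.insert w b) x = si.insert w (h b x))
    (si : PySem.Dict String (PySem.Dict String (List Int))) (b : PySem.Dict String (List Int)) :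
    l.foldl body (si.insert w b) = si.insert w (l.foldl h b) := by
  induction l generalizing b with
  | nil => rfl
  | cons x t ih =>
    rw [List.foldl_cons, List.foldl_cons, compat si b x (List.mem_cons_self),
      ih (fun si b y hy => compat si b y (List.mem_cons_of_mem _ hy))]

theorem pvModify_insert_self (si : PySem.Dict String (PySem.Dict String (List Int)))
    (w : String) (b : PySem.Dict String (List Int)) (g : PySem.Dict String (List Int) → PySem.Dict String (List Int)) :
    (si.insert w b).modify w PySem.Dict.empty g = si.insert w (g b) := by
  simp [PySem.Dict.modify, PySem.Dict.getD_insert_self, PySem.Dict.insert_insert_self]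

theorem pvDocFold (w : String) (docs : List (String × List Int))
    (si : PySem.Dict String (PySem.Dict String (List Int))) (b : PySem.Dict String (List Int)) :
    ((docs.map Prod.fst).foldl (fun si document =>
        if (si.getD w PySem.Dict.empty).contains document then
          si.modify w PySem.Dict.empty
            (fun b => b.modify document [] (fun l => pvSet0 l (pvIdx (pvLookupDoc docs document) 0)))
        else
          si.modify w PySem.Dict.empty
            (fun b => b.insert document [pvIdx (pvLookupDoc docs document) 0,
                                         pvIdx (pvLookupDoc docs document) 1])) (si.insert w b))
      = si.insert w ((docs.map Prod.fst).foldl (fun b document =>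
          if b.contains document then
            b.modify document [] (fun l => pvSet0 l (pvIdx (pvLookupDoc docs document) 0))
          else b.insert document [pvIdx (pvLookupDoc docs document) 0,
                                  pvIdx (pvLookupDoc docs document) 1]) b) := by
  refine pvInsertFold w (docs.map Prod.fst) _ _ (fun si b doc _ => ?_) si b
  rw [PySem.Dict.getD_insert_self]
  by_cases hb : b.contains doc
  · rw [if_pos hb, if_pos hb, pvModify_insert_self]
  · rw [if_neg hb, if_neg hb, pvModify_insert_self]

theorem pvDocFold_eq (docs : List (String × List Int)) (hnd : (docs.map Prod.fst).Nodup)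
    (b : PySem.Dict String (List Int)) :
    ((docs.map Prod.fst).foldl (fun b document =>
        if b.contains document then
          b.modify document [] (fun l => pvSet0 l (pvIdx (pvLookupDoc docs document) 0))
        else b.insert document [pvIdx (pvLookupDoc docs document) 0,
                                pvIdx (pvLookupDoc docs document) 1]) b)
      = docs.foldl pvBucketStep b := by
  rw [List.foldl_map]
  refine PySem.List.foldl_congr_mem _ _ _ _ (fun b dv hdv => ?_)
  rw [pvLookupDoc_eq docs dv hdv hnd]
  rfl

theorem pvWordBody (index : List (String × Int × List (String × List Int)))
    (hP : Pre_index_conversion index) (w : String)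
    (si : PySem.Dict String (PySem.Dict String (List Int))) :
    (((index.filter (fun e => e.1 == w)).map (fun e => e.2.1)).foldl
      (fun si p =>
        let docs := pvLookupWP index w p
        ((docs.map Prod.fst).foldl (fun si document =>
          if (si.getD w PySem.Dict.empty).contains document then
            si.modify w PySem.Dict.empty
              (fun b => b.modify document [] (fun l => pvSet0 l (pvIdx (pvLookupDoc docs document) 0)))
          else
            si.modify w PySem.Dict.empty
              (fun b => b.insert document [pvIdx (pvLookupDoc docs document) 0,
                                           pvIdx (pvLookupDoc docs document) 1])) si))
      (si.insert w PySem.Dict.empty))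
      = si.insert w (pvBucketOf index w) := by
  have hstep := pvInsertFold w ((index.filter (fun e => e.1 == w)).map (fun e => e.2.1))
    (fun si p =>
      let docs := pvLookupWP index w p
      ((docs.map Prod.fst).foldl (fun si document =>
        if (si.getD w PySem.Dict.empty).contains document then
          si.modify w PySem.Dict.empty
            (fun b => b.modify document [] (fun l => pvSet0 l (pvIdx (pvLookupDoc docs document) 0)))
        else
          si.modify w PySem.Dict.empty
            (fun b => b.insert document [pvIdx (pvLookupDoc docs document) 0,
                                         pvIdx (pvLookupDoc docs document) 1])) si))
    (fun b p => ((pvLookupWP index w p).map Prod.fst).foldl (fun b document =>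
          if b.contains document then
            b.modify document [] (fun l => pvSet0 l (pvIdx (pvLookupDoc (pvLookupWP index w p) document) 0))
          else b.insert document [pvIdx (pvLookupDoc (pvLookupWP index w p) document) 0,
                                  pvIdx (pvLookupDoc (pvLookupWP index w p) document) 1]) b)
    (fun si b p _ => pvDocFold w (pvLookupWP index w p) si b) si PySem.Dict.empty
  rw [hstep]
  congr 1
  rw [List.foldl_map]
  unfold pvBucketOf
  refine PySem.List.foldl_congr_mem _ _ _ _ (fun b e he => ?_)
  obtain ⟨heidx, hew⟩ := List.mem_filter.1 he
  have hew' : e.1 = w := by simpa using hew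
  have hlk : pvLookupWP index w e.2.1 = e.2.2 := by
    rw [← hew']; exact pvLookupWP_eq index e heidx hP.1
  rw [hlk]
  exact pvDocFold_eq e.2.2 (hP.2.1 e heidx) b

theorem pvA_items (index : List (String × Int × List (String × List Int)))
    (h : Pre_index_conversion index) :
    ((PySem.Dict.ofList ((index.foldl (fun d e => d.modify e.1 [] (fun l => l ++ [e.2.1]))
        (PySem.Dict.empty : PySem.Dict String (List Int))).items)).items.foldl (fun si wps =>
      (wps.2.foldl (fun si p =>
        let docs := pvLookupWP index wps.1 p
        ((docs.map Prod.fst).foldl (fun si document =>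
          if (si.getD wps.1 PySem.Dict.empty).contains document then
            si.modify wps.1 PySem.Dict.empty
              (fun b => b.modify document [] (fun l => pvSet0 l (pvIdx (pvLookupDoc docs document) 0)))
          else
            si.modify wps.1 PySem.Dict.empty
              (fun b => b.insert document [pvIdx (pvLookupDoc docs document) 0,
                                           pvIdx (pvLookupDoc docs document) 1])) si))
        (si.insert wps.1 PySem.Dict.empty)))
      (PySem.Dict.empty : PySem.Dict String (PySem.Dict String (List Int)))).items = pvCanon index := by
  rw [pvD_items index]
  have hfst : (((PySem.Set.ofList (index.map (fun e => e.1))).map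
      (fun w => (w, (index.filter (fun e => e.1 == w)).map (fun e => e.2.1)))).map Prod.fst)
      = PySem.Set.ofList (index.map (fun e => e.1)) := by
    simp [Function.comp_def]
  rw [pvOfList_items _ (by rw [hfst]; exact PySem.Set.nodup_ofList _)]
  have hcong := PySem.List.foldl_congr_mem
    ((PySem.Set.ofList (index.map (fun e => e.1))).map
      (fun w => (w, (index.filter (fun e => e.1 == w)).map (fun e => e.2.1))))
    (fun si wps =>
      (wps.2.foldl (fun si p =>
        let docs := pvLookupWP index wps.1 p
        ((docs.map Prod.fst).foldl (fun si document =>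
          if (si.getD wps.1 PySem.Dict.empty).contains document then
            si.modify wps.1 PySem.Dict.empty
              (fun b => b.modify document [] (fun l => pvSet0 l (pvIdx (pvLookupDoc docs document) 0)))
          else
            si.modify wps.1 PySem.Dict.empty
              (fun b => b.insert document [pvIdx (pvLookupDoc docs document) 0,
                                           pvIdx (pvLookupDoc docs document) 1])) si))
        (si.insert wps.1 PySem.Dict.empty)))
    (fun si wps => si.insert wps.1 (pvBucketOf index wps.1))
    (PySem.Dict.empty : PySem.Dict String (PySem.Dict String (List Int)))
    (by
      intro si wps hwps
      obtain ⟨w, hwW, rfl⟩ := List.mem_map.1 hwps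
      exact pvWordBody index h w si)
  have hfresh := PySem.Dict.items_foldl_insert_fresh
    (l := (PySem.Set.ofList (index.map (fun e => e.1))).map
      (fun w => (w, (index.filter (fun e => e.1 == w)).map (fun e => e.2.1))))
    (k := fun wps => wps.1) (v := fun wps => pvBucketOf index wps.1)
    (d := PySem.Dict.empty) (fun a _ => PySem.Dict.contains_empty _)
    (by rw [hfst]; exact PySem.Set.nodup_ofList _)
  rw [hcong, hfresh]
  unfold pvCanon
  simp [Function.comp_def]
  rfl

-- ---- B-side: characterising a bucket fold as sum / first-seen ----

theorem pvContains_find (b : List (String × List Int)) (d : String) :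
    (b.map Prod.fst).contains d = (b.find? (fun dv => dv.1 == d)).isSome := by
  induction b with
  | nil => rfl
  | cons a t ih =>
    simp only [List.map_cons, List.contains_cons, List.find?]
    by_cases h : a.1 = d
    · simp [h]
    · rw [show (a.1 == d) = false by simpa using h,
        show (d == a.1) = false by simpa using Ne.symm h]
      simpa using ih

theorem pvFilter_nodup (b : List (String × List Int)) (d : String)
    (hnd : (b.map Prod.fst).Nodup) :
    b.filter (fun dv => dv.1 == d) = (b.find? (fun dv => dv.1 == d)).toList := by
  induction b with
  | nil => rfl
  | cons a t ih =>
    by_cases h : a.1 = d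
    · have hnil : t.filter (fun dv => dv.1 == d) = [] := by
        refine List.filter_eq_nil_iff.2 (fun x hx => ?_)
        simp only [beq_iff_eq]
        intro hxd
        exact (List.nodup_cons.1 hnd).1 (by rw [h, ← hxd]; exact List.mem_map_of_mem hx)
      simp [List.find?, h, hnil]
    · simp only [List.filter_cons, List.find?]
      rw [show (a.1 == d) = false by simpa using h]
      exact ih (List.nodup_cons.1 hnd).2

theorem pvSetSnoc (xs : List String) (x : String) :
    PySem.Set.ofList (xs ++ [x])
      = if x ∈ xs then PySem.Set.ofList xs else PySem.Set.ofList xs ++ [x] := by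
  rw [PySem.Set.ofList_eq_foldl, List.foldl_append, ← PySem.Set.ofList_eq_foldl]
  simp only [List.foldl_cons, List.foldl_nil, PySem.Set.add]
  by_cases h : x ∈ xs
  · rw [if_pos h, if_pos (by simp [PySem.Set.contains, PySem.Set.mem_ofList, h])]
  · rw [if_neg h, if_neg (by simp [PySem.Set.contains, PySem.Set.mem_ofList, h])]

theorem pvBucketFold_items (L : List (String × List Int)) :
    ((L.foldl pvBucketStep PySem.Dict.empty).items)
      = (PySem.Set.ofList (L.map Prod.fst)).map (fun d => (d, [pvSum L d, pvFst L d])) := by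
  induction L using List.reverseRecOn with
  | nil => rfl
  | append_singleton L dv ih =>
    rw [List.foldl_append, List.foldl_cons, List.foldl_nil]
    have hkeys : (L.foldl pvBucketStep PySem.Dict.empty).keys
        = PySem.Set.ofList (L.map Prod.fst) := by
      simp only [PySem.Dict.keys, ih, List.map_map, Function.comp_def]
      simp
    have hnd : (L.foldl pvBucketStep PySem.Dict.empty).keys.Nodup := by
      rw [hkeys]; exact PySem.Set.nodup_ofList _
    have hsum_ne : ∀ d, d ≠ dv.1 → pvSum (L ++ [dv]) d = pvSum L d := by
      intro d hne
      unfold pvSum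
      rw [List.filter_append, List.filter_cons]
      rw [show (dv.1 == d) = false by simpa using (Ne.symm hne)]
      simp
    have hfst_ne : ∀ d, d ≠ dv.1 → pvFst (L ++ [dv]) d = pvFst L d := by
      intro d hne
      unfold pvFst
      rw [List.find?_append]
      cases hf : L.find? (fun x => x.1 == d) with
      | some v => simp
      | none =>
        simp only [List.find?]
        rw [show (dv.1 == d) = false by simpa using (Ne.symm hne)]
        rfl
    rw [List.map_append, List.map_singleton, pvSetSnoc]
    by_cases hmem : dv.1 ∈ L.map Prod.fst
    · rw [if_pos hmem]
      have hcont : (L.foldl pvBucketStep PySem.Dict.empty).contains dv.1 = true := by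
        rw [PySem.Dict.contains_eq_decide_mem_keys, hkeys]
        simp [PySem.Set.mem_ofList, hmem]
      have hmemit : (dv.1, [pvSum L dv.1, pvFst L dv.1]) ∈ (L.foldl pvBucketStep PySem.Dict.empty).items := by
        rw [ih]
        exact List.mem_map.2 ⟨dv.1, (PySem.Set.mem_ofList _ _).2 hmem, rfl⟩
      have hgetD : (L.foldl pvBucketStep PySem.Dict.empty).getD dv.1 []
          = [pvSum L dv.1, pvFst L dv.1] := PySem.Dict.getD_of_mem_items _ hmemit hnd []
      rw [show pvBucketStep (L.foldl pvBucketStep PySem.Dict.empty) dv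
          = (L.foldl pvBucketStep PySem.Dict.empty).insert dv.1
              (pvSet0 ((L.foldl pvBucketStep PySem.Dict.empty).getD dv.1 []) (pvIdx dv.2 0)) by
        simp [pvBucketStep, hcont, PySem.Dict.modify]]
      rw [PySem.Dict.items_insert_of_contains _ _ hcont, ih, hgetD, List.map_map]
      refine List.map_congr_left (fun d hd => ?_)
      by_cases hde : d = dv.1
      · have hsum : pvSum (L ++ [dv]) d = pvSum L d + pvIdx dv.2 0 := by
          unfold pvSum
          rw [List.filter_append, List.filter_cons,
            show (dv.1 == d) = true by simpa using hde.symm]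
          simp
        have hfst : pvFst (L ++ [dv]) d = pvFst L d := by
          unfold pvFst
          rw [List.find?_append]
          have hs : (L.find? (fun x => x.1 == d)).isSome := by
            rw [← pvContains_find]
            simpa [hde] using hmem
          cases hf : L.find? (fun x => x.1 == d) with
          | some v => simp
          | none => rw [hf] at hs; cases hs
        simp only [Function.comp_apply]
        rw [show ((d, [pvSum L d, pvFst L d]).1 == dv.1) = true by simpa using hde]
        rw [hsum, hfst]
        simp [pvSet0, hde]
      · simp only [Function.comp_apply]
        rw [show ((d, [pvSum L d, pvFst L d]).1 == dv.1) = false by simpa using hde]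
        simp [hsum_ne d hde, hfst_ne d hde]
    · rw [if_neg hmem]
      have hcont : (L.foldl pvBucketStep PySem.Dict.empty).contains dv.1 = false := by
        rw [PySem.Dict.contains_eq_decide_mem_keys, hkeys]
        simp [PySem.Set.mem_ofList, hmem]
      rw [show pvBucketStep (L.foldl pvBucketStep PySem.Dict.empty) dv
          = (L.foldl pvBucketStep PySem.Dict.empty).insert dv.1 [pvIdx dv.2 0, pvIdx dv.2 1] by
        simp [pvBucketStep, hcont]]
      rw [PySem.Dict.items_insert_of_not_contains _ _ hcont, ih, List.map_append, List.map_singleton]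
      congr 1
      · refine List.map_congr_left (fun d hd => ?_)
        have hde : d ≠ dv.1 := fun h => hmem (h ▸ (PySem.Set.mem_ofList _ _).1 hd)
        rw [hsum_ne d hde, hfst_ne d hde]
      · have hfnone : L.find? (fun x => x.1 == dv.1) = none := by
          cases hf : L.find? (fun x => x.1 == dv.1) with
          | none => rfl
          | some v =>
            have h := pvContains_find L dv.1
            rw [hf] at h
            simp at h
            obtain ⟨x, hx⟩ := h
            exact absurd (List.mem_map.2 ⟨(dv.1, x), hx, rfl⟩) hmem
        have hnil : L.filter (fun x => x.1 == dv.1) = [] := by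
          refine List.filter_eq_nil_iff.2 (fun x hx => ?_)
          simp only [beq_iff_eq]
          exact fun h => hmem (h ▸ List.mem_map_of_mem hx)
        have hsum : pvSum (L ++ [dv]) dv.1 = pvIdx dv.2 0 := by
          unfold pvSum
          rw [List.filter_append, hnil, List.filter_cons]
          simp
        have hfst : pvFst (L ++ [dv]) dv.1 = pvIdx dv.2 1 := by
          unfold pvFst
          rw [List.find?_append, hfnone]
          simp [List.find?, pvIdx, PySem.List.pyGet?]
        rw [hsum, hfst]

theorem pvFoldlBuckets (bs : List (List (String × List Int)))
    (init : PySem.Dict String (List Int)) :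
    bs.foldl (fun b l => l.foldl pvBucketStep b) init
      = (bs.flatMap id).foldl pvBucketStep init := by
  induction bs generalizing init with
  | nil => rfl
  | cons b t ih => simp [List.flatMap_cons, List.foldl_append, ih]

theorem pvSum_flat (bs : List (List (String × List Int))) (d : String)
    (hnd : ∀ b ∈ bs, (b.map Prod.fst).Nodup) :
    pvSum (bs.flatMap id) d
      = ((bs.filter (fun b => (b.map Prod.fst).contains d)).map
          (fun b => pvIdx (pvLookupDoc b d) 0)).sum := by
  induction bs with
  | nil => rfl
  | cons b t ih =>
    unfold pvSum at *
    rw [List.flatMap_cons]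
    simp only [id]
    rw [List.filter_append, List.map_append, List.sum_append,
      ih (fun x hx => hnd x (List.mem_cons_of_mem _ hx)),
      pvFilter_nodup b d (hnd b List.mem_cons_self), List.filter_cons]
    cases hf : b.find? (fun dv => dv.1 == d) with
    | none =>
      rw [show (b.map Prod.fst).contains d = false by rw [pvContains_find, hf]; rfl]
      simp
    | some v =>
      rw [show (b.map Prod.fst).contains d = true by rw [pvContains_find, hf]; rfl]
      simp [pvLookupDoc, hf]

theorem pvFst_flat (bs : List (List (String × List Int))) (d : String) :
    pvFst (bs.flatMap id) d
      = pvIdx (pvLookupDoc ((bs.find? (fun b => (b.map Prod.fst).contains d)).getD []) d) 1 := by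
  induction bs with
  | nil => rfl
  | cons b t ih =>
    unfold pvFst at *
    rw [List.flatMap_cons, List.find?_append, List.find?_cons]
    simp only [id]
    cases hf : b.find? (fun dv => dv.1 == d) with
    | none =>
      rw [show (b.map Prod.fst).contains d = false by rw [pvContains_find, hf]; rfl]
      simpa [hf] using ih
    | some v =>
      rw [show (b.map Prod.fst).contains d = true by rw [pvContains_find, hf]; rfl]
      simp [hf, pvLookupDoc]

theorem pvPerWord (index : List (String × Int × List (String × List Int)))
    (hP : Pre_index_conversion index) (w : String) :
    (pvBucketOf index w).items
      = (PySem.Set.ofList (((index.filter (fun e => e.1 == w)).map (fun e => e.2.2)).flatMap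
          (fun b => b.map Prod.fst))).map (fun d =>
        (d, [((((index.filter (fun e => e.1 == w)).map (fun e => e.2.2)).filter
                (fun b => (b.map Prod.fst).contains d)).map
                (fun b => pvIdx (pvLookupDoc b d) 0)).sum,
             pvIdx (pvLookupDoc ((((index.filter (fun e => e.1 == w)).map (fun e => e.2.2)).find?
                (fun b => (b.map Prod.fst).contains d)).getD []) d) 1])) := by
  have hbs : ∀ b ∈ (index.filter (fun e => e.1 == w)).map (fun e => e.2.2),
      (b.map Prod.fst).Nodup := by
    intro b hb
    obtain ⟨e, he, rfl⟩ := List.mem_map.1 hb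
    exact hP.2.1 e (List.mem_filter.1 he).1
  set bs := (index.filter (fun e => e.1 == w)).map (fun e => e.2.2) with hbsdef
  have h1 : pvBucketOf index w = (bs.flatMap id).foldl pvBucketStep PySem.Dict.empty := by
    unfold pvBucketOf
    rw [← pvFoldlBuckets, hbsdef, List.foldl_map]
  have h2 : (bs.flatMap id).map Prod.fst = bs.flatMap (fun b => b.map Prod.fst) := by
    rw [List.map_flatMap]
    simp [id]
  rw [h1, pvBucketFold_items, h2]
  refine List.map_congr_left (fun d hd => ?_)
  rw [pvSum_flat bs d hbs, pvFst_flat bs d]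

-- ===== VERDICT (by name: the statement is the Claim_ definition above) =====
theorem index_conversion_spec : Claim_equal_index_conversion := by
  intro index _ hpre
  unfold Spec_index_conversion
  have hA : index_conversion index = (pvCanon index).map (fun p => (p.1, p.2.items)) :=
    congrArg (List.map (fun p : String × PySem.Dict String (List Int) => (p.1, p.2.items)))
      (pvA_items index hpre)
  rw [hA]
  unfold pvCanon
  rw [List.map_map]
  exact List.map_congr_left (fun w hw =>
    congrArg (fun l => (w, l)) (pvPerWord index hpre w))
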